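-- pv_equiv track=rewrite | github.com/motykatomasz/Pythia-AI-code-completion | datasets/Python150k.py | create_type_mapping
-- ===== SOURCE A (Python) =====
-- def create_type_mapping(vocab):
--     type2idx = {}
--     idx2type = {}
--     for (idx, w) in enumerate(vocab):
--         t = w.split(':')
--         if len(t) > 1:
--             type = t[1]
--             idx2type[idx] = type
--             if type in type2idx:
--                 type2idx[type].append(idx)
--             else:
--                 type2idx[type] = [idx]
--         else:
--             idx2type[idx] = None
--
--     return type2idx, idx2type
-- ===== SOURCE B (Python) =====
-- def _type_of(w):
--     t = w.split(':')
--     return t[1] if len(t) > 1 else None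
--
--
-- def create_type_mapping(vocab):
--     # Stage 1: one table of types, positionally aligned with vocab.
--     types = [_type_of(w) for w in vocab]
--     idx2type = dict(enumerate(types))
--     # Stage 2: the distinct types in first-occurrence order.
--     distinct = []
--     for t in types:
--         if t is not None and t not in distinct:
--             distinct.append(t)
--     # Stage 3: brute-force grouping — for each distinct type, one full scan
--     # collecting the indices carrying it (ascending by construction).
--     type2idx = {t: [i for i, u in enumerate(types) if u == t] for t in distinct}
--     return type2idx, idx2type
-- ===== Notes on version B (the rewrite author's own statement) =====
-- stated objective: alternative
-- what changed: B replaces A's single interleaved dict-building loop by three staged passes: a positional list of types, the distinct types in first-occurrence order, and then a brute-force grouping that performs one full index scan per distinct type (O(n*k)) instead of appending into type2idx as it goes.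
import Mathlib
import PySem

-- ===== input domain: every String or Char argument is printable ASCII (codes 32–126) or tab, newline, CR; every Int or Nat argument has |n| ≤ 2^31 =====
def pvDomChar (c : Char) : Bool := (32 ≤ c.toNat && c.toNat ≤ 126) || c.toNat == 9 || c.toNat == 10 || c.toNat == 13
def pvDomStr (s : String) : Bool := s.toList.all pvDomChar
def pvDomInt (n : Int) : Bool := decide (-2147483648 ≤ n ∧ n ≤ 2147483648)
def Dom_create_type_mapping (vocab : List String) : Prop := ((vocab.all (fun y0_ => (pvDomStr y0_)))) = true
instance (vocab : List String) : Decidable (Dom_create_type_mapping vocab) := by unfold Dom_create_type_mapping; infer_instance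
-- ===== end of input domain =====

-- B replaces A's single interleaved loop by three staged passes: a positional type table,
-- the distinct types in first-occurrence order, then one brute-force index scan per distinct
-- type — a different (O(n·k)) grouping algorithm with identical results.

-- ===== PORT A =====
-- loop body of A's single interleaved loop
def ctmStepA (st : PySem.Dict String (List Int) × PySem.Dict Int (Option String))
    (p : Int × String) : PySem.Dict String (List Int) × PySem.Dict Int (Option String) :=
  let t := (PySem.Str.split? p.2 ":").getD []
  if t.length > 1 then
    let ty := t.getD 1 ""   -- t[1]; exact since t.length > 1
    let idx2type := st.2.insert p.1 (some ty)
    let type2idx :=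
      if st.1.contains ty then st.1.modify ty [] (· ++ [p.1])  -- type2idx[type].append(idx)
      else st.1.insert ty [p.1]
    (type2idx, idx2type)
  else
    (st.1, st.2.insert p.1 none)

def create_type_mapping (vocab : List String) :
    (List (String × List Int)) × (List (Int × Option String)) :=
  let st := (PySem.List.enumerate vocab).foldl ctmStepA (PySem.Dict.empty, PySem.Dict.empty)
  (st.1.items, st.2.items)

-- ===== PORT B =====
-- helper _type_of of Source B
def ctmTypeOf (w : String) : Option String :=
  let t := (PySem.Str.split? w ":").getD []
  if t.length > 1 then some (t.getD 1 "") else none   -- t[1]; exact since t.length > 1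

def create_type_mapping_alt (vocab : List String) :
    (List (String × List Int)) × (List (Int × Option String)) :=
  -- Stage 1: positional type table and idx2type
  let types := vocab.map ctmTypeOf
  let idx2type := (PySem.List.enumerate types).foldl
      (fun (d : PySem.Dict Int (Option String)) p => d.insert p.1 p.2) PySem.Dict.empty
  -- Stage 2: distinct types in first-occurrence order
  let distinct := types.foldl
      (fun (acc : List String) t =>
        match t with
        | none => acc
        | some s => if s ∈ acc then acc else acc ++ [s]) []
  -- Stage 3: one full scan per distinct type (dict comprehension)
  let type2idx := distinct.foldl
      (fun (d : PySem.Dict String (List Int)) t =>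
        d.insert t (((PySem.List.enumerate types).filter
          (fun p => p.2 == some t)).map (fun p => p.1)))
      PySem.Dict.empty
  (type2idx.items, idx2type.items)

-- ===== PRECONDITION & SPEC =====
def Spec_create_type_mapping (vocab : List String) (out : (List (String × List Int)) × (List (Int × Option String))) : Prop := out = create_type_mapping_alt vocab
instance (vocab : List String) (out : (List (String × List Int)) × (List (Int × Option String))) : Decidable (Spec_create_type_mapping vocab out) := by unfold Spec_create_type_mapping; infer_instance

-- ===== CLAIM (what is proved, stated in full; the proofs are below) =====
def Claim_equal_create_type_mapping : Prop := ∀ (vocab : List String), Dom_create_type_mapping vocab → Spec_create_type_mapping vocab (create_type_mapping vocab)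

-- ===== LEMMAS AND PROOFS =====

-- A's grouping action on one (idx, optional type) pair, used only to restate A's fold
def ctmGroup (d : PySem.Dict String (List Int)) (q : Int × Option String) :
    PySem.Dict String (List Int) :=
  match q.2 with
  | none => d
  | some ty => d.modify ty [] (· ++ [q.1])

-- the typed pairs (type, idx) extracted from an enumerated list
def ctmPairs (l : List (Int × String)) : List (String × Int) :=
  l.filterMap (fun p => (ctmTypeOf p.2).map (fun ty => (ty, p.1)))

-- one step of A's loop, expressed through ctmGroup / ctmTypeOf
theorem ctm_stepA_eq (st : PySem.Dict String (List Int) × PySem.Dict Int (Option String))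
    (p : Int × String) :
    ctmStepA st p = (ctmGroup st.1 (p.1, ctmTypeOf p.2), st.2.insert p.1 (ctmTypeOf p.2)) := by
  simp only [ctmStepA, ctmGroup, ctmTypeOf]
  split_ifs with h hc
  · simp
  · have hg := PySem.Dict.getD_of_not_contains st.1 ([] : List Int)
      (k := ((PySem.Str.split? p.2 ":").getD [])[1]?.getD "")
      (by simpa [List.getD_eq_getElem?_getD] using hc)
    simp [PySem.Dict.modify, hg]
  · rfl

-- the two components of A's interleaved fold are independent folds
theorem ctm_foldA_split (l : List (Int × String))
    (d : PySem.Dict String (List Int)) (e : PySem.Dict Int (Option String)) :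
    l.foldl ctmStepA (d, e) =
      (l.foldl (fun d p => ctmGroup d (p.1, ctmTypeOf p.2)) d,
       l.foldl (fun e p => e.insert p.1 (ctmTypeOf p.2)) e) := by
  induction l generalizing d e with
  | nil => rfl
  | cons p l ih => simp only [List.foldl_cons, ctm_stepA_eq, ih]

-- A's grouping fold is the modify-append fold over the typed pairs
theorem ctm_group_fold (l : List (Int × String)) (d : PySem.Dict String (List Int)) :
    l.foldl (fun d p => ctmGroup d (p.1, ctmTypeOf p.2)) d =
      (ctmPairs l).foldl (fun d q => d.modify q.1 [] (· ++ [q.2])) d := by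
  induction l generalizing d with
  | nil => rfl
  | cons p l ih =>
    cases h : ctmTypeOf p.2 <;> simp [ctmPairs, ctmGroup, h] <;>
      exact ih _

-- enumerate of a mapped list
theorem ctm_enumerate_map {α β : Type} (f : α → β) (xs : List α) (s : Int) :
    PySem.List.enumerate (xs.map f) s =
      (PySem.List.enumerate xs s).map (fun p => (p.1, f p.2)) := by
  induction xs generalizing s with
  | nil => rfl
  | cons x xs ih => simp [PySem.List.enumerate, ih]

-- second components of enumerate give back the list
theorem ctm_enumerate_snd {α : Type} (xs : List α) (s : Int) :
    (PySem.List.enumerate xs s).map (fun p => p.2) = xs := by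
  induction xs generalizing s with
  | nil => rfl
  | cons x xs ih => simp [PySem.List.enumerate, ih]

-- the keys of the typed pairs are the typed entries of the type table
theorem ctm_pairs_fst (l : List (Int × String)) :
    (ctmPairs l).map (fun q => q.1) = (l.map (fun p => ctmTypeOf p.2)).filterMap id := by
  induction l with
  | nil => rfl
  | cons p l ih =>
    cases h : ctmTypeOf p.2 <;> simp [ctmPairs, h] <;>
      simpa [ctmPairs] using ih

-- B's distinct-accumulating fold is Set.update
theorem ctm_distinct_eq (ts : List (Option String)) (acc : List String) :
    ts.foldl
      (fun (acc : List String) t =>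
        match t with
        | none => acc
        | some s => if s ∈ acc then acc else acc ++ [s]) acc =
      PySem.Set.update acc (ts.filterMap id) := by
  induction ts generalizing acc with
  | nil => rfl
  | cons t ts ih =>
    cases t with
    | none => simpa [List.filterMap_cons] using ih acc
    | some s =>
      simp only [List.foldl_cons, List.filterMap_cons, id, PySem.Set.update, PySem.Set.add,
        PySem.Set.contains, List.contains_eq_mem]
      rw [← PySem.Set.update, ih]
      by_cases h : s ∈ acc <;> simp [h]

-- grouping by filtering the enumerated type table = projecting the typed pairs
theorem ctm_values_eq (l : List (Int × String)) (t : String) :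
    ((ctmPairs l).filter (fun q => q.1 == t)).map (fun q => q.2) =
      ((l.map (fun p => (p.1, ctmTypeOf p.2))).filter
        (fun p => p.2 == some t)).map (fun p => p.1) := by
  induction l with
  | nil => rfl
  | cons p l ih =>
    cases h : ctmTypeOf p.2 with
    | none => simpa [ctmPairs, h, List.filterMap_cons, List.filter_cons] using ih
    | some ty =>
      by_cases hty : ty = t <;>
        simpa [ctmPairs, h, hty, List.filterMap_cons, List.filter_cons] using ih

-- ===== VERDICT (by name: the statement is the Claim_ definition above) =====
theorem create_type_mapping_spec : Claim_equal_create_type_mapping := by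
  intro vocab _
  unfold Spec_create_type_mapping
  simp only [create_type_mapping, create_type_mapping_alt, ctm_foldA_split, ctm_group_fold]
  simp only [Prod.mk.injEq]
  refine ⟨?_, ?_⟩
  · -- type2idx side
    set E := PySem.List.enumerate vocab with hE
    set P := ctmPairs E with hP
    -- A's dict
    set dA := P.foldl (fun d q => d.modify q.1 [] (· ++ [q.2])) PySem.Dict.empty with hdA
    have hkeys : dA.keys = PySem.Set.ofList (P.map (fun q => q.1)) := by
      rw [hdA, PySem.Dict.keys_foldl_modify_key P (fun q => q.1) []
        (fun _ q => (· ++ [q.2])) PySem.Dict.empty]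
      simp [PySem.Set.ofList_eq_foldl, PySem.Set.update]
    have hnodupA : dA.keys.Nodup := by
      rw [hdA]
      exact PySem.Dict.nodup_keys_foldl_modify_key P (fun q => q.1) []
        (fun _ q => (· ++ [q.2])) PySem.Dict.empty PySem.Dict.nodup_keys_empty
    have hgetD : ∀ t, dA.getD t [] = ((P.filter (fun q => q.1 == t)).map (fun q => q.2)) := by
      intro t
      rw [hdA, PySem.Dict.getD_foldl_modify_append]
      simp
    -- B's distinct list equals dA.keys
    have hdistinct :
        (vocab.map ctmTypeOf).foldl
          (fun (acc : List String) t =>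
            match t with
            | none => acc
            | some s => if s ∈ acc then acc else acc ++ [s]) [] = dA.keys := by
      rw [ctm_distinct_eq, hkeys, ctm_pairs_fst]
      have : E.map (fun p => ctmTypeOf p.2) = vocab.map ctmTypeOf := by
        rw [hE, ← ctm_enumerate_snd vocab 0, List.map_map]
        simp
      rw [this, PySem.Set.ofList_eq_foldl]
      rfl
    rw [hdistinct]
    -- B's dict items via fresh inserts
    have hfresh := PySem.Dict.items_foldl_insert_fresh dA.keys (fun t => t)
      (fun t => (((PySem.List.enumerate (vocab.map ctmTypeOf)).filter
          (fun p => p.2 == some t)).map (fun p => p.1)))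
      PySem.Dict.empty (fun a _ => PySem.Dict.contains_empty a)
      (by simpa using hnodupA)
    rw [hfresh]
    -- A's dict items via keys
    rw [PySem.Dict.items_eq_map_keys dA hnodupA []]
    simp only [PySem.Dict.empty, List.nil_append]
    refine List.map_congr_left (fun t _ => ?_)
    rw [hgetD t, ctm_values_eq, ctm_enumerate_map ctmTypeOf vocab 0]
  · -- idx2type side
    rw [ctm_enumerate_map ctmTypeOf vocab 0, List.foldl_map]
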